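-- pv_equiv track=rewrite | github.com/wdm0006/ParGA | examples/protein_hp_folding.py | fold_protein
-- ===== SOURCE A (Python) =====
-- from enum import IntEnum
--
-- class Move(IntEnum):
--     """Direction moves on 2D lattice (relative to previous direction)."""
--
--     FORWARD = 0  # Continue same direction
--     LEFT = 1  # Turn left 90 degrees
--     RIGHT = 2  # Turn right 90 degrees
--
-- DIRECTIONS = [(0, 1), (1, 0), (0, -1), (-1, 0)]
--
-- def fold_protein(sequence: str, moves: list[int]) -> list[tuple[int, int]] | None:
--     """Fold a protein sequence according to move instructions.
--
--     Args:
--         sequence: HP sequence string (e.g., "HPHPPHHPHPPHH")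
--         moves: List of moves (0=forward, 1=left, 2=right)
--
--     Returns:
--         List of (x, y) coordinates for each amino acid, or None if invalid
--         (self-intersection detected)
--     """
--     if len(moves) != len(sequence) - 1:
--         raise ValueError(f"Need {len(sequence) - 1} moves for sequence of length {len(sequence)}")
--
--     positions = [(0, 0)]  # First amino acid at origin
--     occupied = {(0, 0)}
--     direction = 0  # Start facing "up"
--
--     for move in moves:
--         # Apply turn
--         if move == Move.LEFT:
--             direction = (direction - 1) % 4
--         elif move == Move.RIGHT:
--             direction = (direction + 1) % 4
--         # FORWARD keeps same direction
--
--         # Move in current direction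
--         dx, dy = DIRECTIONS[direction]
--         new_pos = (positions[-1][0] + dx, positions[-1][1] + dy)
--
--         # Check for self-intersection
--         if new_pos in occupied:
--             return None
--
--         positions.append(new_pos)
--         occupied.add(new_pos)
--
--     return positions
-- ===== SOURCE B (Python) =====
-- DIRECTIONS = [(0, 1), (1, 0), (0, -1), (-1, 0)]
--
--
-- def fold_protein(sequence: str, moves: list[int]) -> list[tuple[int, int]] | None:
--     """Fold by three passes: absolute directions, prefix-sum coordinates, global dedup check."""
--     if len(moves) != len(sequence) - 1:
--         raise ValueError(f"Need {len(sequence) - 1} moves for sequence of length {len(sequence)}")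
--
--     # Pass 1: turn relative moves into a list of absolute directions.
--     dirs = []
--     d = 0
--     for m in moves:
--         d = (d + (-1 if m == 1 else 1 if m == 2 else 0)) % 4
--         dirs.append(d)
--
--     # Pass 2: prefix-sum the unit steps from the origin.
--     x = y = 0
--     positions = [(0, 0)]
--     for d in dirs:
--         dx, dy = DIRECTIONS[d]
--         x += dx
--         y += dy
--         positions.append((x, y))
--
--     # Pass 3: any self-intersection anywhere means the fold is invalid.
--     if len(set(positions)) != len(positions):
--         return None
--     return positions
-- ===== Notes on version B (the rewrite author's own statement) =====
-- stated objective: alternative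
-- what changed: A walks once, tracking an occupied set and returning None at the first collision; B makes three separate passes: relative moves -> absolute direction list, prefix-sum of unit steps -> coordinate list, then a single global duplicate check at the end. Pre_ excludes only the inputs with len(moves) != len(sequence)-1, on which both raise ValueError.
import Mathlib
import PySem

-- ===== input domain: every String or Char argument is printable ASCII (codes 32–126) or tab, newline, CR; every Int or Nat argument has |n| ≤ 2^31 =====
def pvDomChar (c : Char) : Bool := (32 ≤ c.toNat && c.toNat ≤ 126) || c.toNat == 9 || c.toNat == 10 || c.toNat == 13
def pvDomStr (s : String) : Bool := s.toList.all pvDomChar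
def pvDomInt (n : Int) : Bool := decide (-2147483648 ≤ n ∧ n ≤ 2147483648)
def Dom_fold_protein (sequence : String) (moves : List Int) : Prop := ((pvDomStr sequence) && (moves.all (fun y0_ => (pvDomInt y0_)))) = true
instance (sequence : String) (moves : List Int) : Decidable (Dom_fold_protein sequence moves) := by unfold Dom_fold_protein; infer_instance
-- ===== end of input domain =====

-- B re-folds in three passes (absolute-direction list, prefix-sum coordinates, one global
-- duplicate check) instead of A's single walk with an incremental occupied set and early return.

-- ===== PORT A =====
def pvDIRECTIONS : List (Int × Int) := [(0, 1), (1, 0), (0, -1), (-1, 0)]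

-- A's loop: state = (positions, occupied, direction); returns none on self-intersection
def foldALoop : List Int → List (Int × Int) → PySem.Set (Int × Int) → Int → Option (List (Int × Int))
  | [], positions, _, _ => some positions
  | move :: rest, positions, occupied, direction =>
    let direction' := if move = 1 then PySem.Int.mod (direction - 1) 4
      else if move = 2 then PySem.Int.mod (direction + 1) 4
      else direction
    let dxy := PySem.List.pyGetD pvDIRECTIONS direction' (0, 0)  -- direction' ∈ [0,4): always in range
    let last := PySem.List.pyGetD positions (-1) (0, 0)          -- positions is never empty
    let new_pos := (last.1 + dxy.1, last.2 + dxy.2)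
    if PySem.Set.contains occupied new_pos then none
    else foldALoop rest (positions ++ [new_pos]) (PySem.Set.add occupied new_pos) direction'

def fold_protein (sequence : String) (moves : List Int) : Option (List (Int × Int)) :=
  if (moves.length : Int) ≠ PySem.Str.len sequence - 1 then none  -- ValueError: excluded by Pre_
  else foldALoop moves [(0, 0)] (PySem.Set.ofList [(0, 0)]) 0

-- ===== PORT B =====
def fold_protein_alt (sequence : String) (moves : List Int) : Option (List (Int × Int)) :=
  if (moves.length : Int) ≠ PySem.Str.len sequence - 1 then none  -- ValueError: excluded by Pre_
  else
    -- Pass 1: relative moves → absolute direction list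
    let dirs := (moves.foldl (fun (acc : List Int × Int) m =>
      let d := PySem.Int.mod (acc.2 + (if m = 1 then (-1 : Int) else if m = 2 then 1 else 0)) 4
      (acc.1 ++ [d], d)) ([], 0)).1
    -- Pass 2: prefix-sum the unit steps from the origin
    let positions := (dirs.foldl (fun (acc : List (Int × Int) × Int × Int) d =>
      let dxy := PySem.List.pyGetD pvDIRECTIONS d (0, 0)
      let x := acc.2.1 + dxy.1
      let y := acc.2.2 + dxy.2
      (acc.1 ++ [(x, y)], x, y)) ([((0 : Int), (0 : Int))], 0, 0)).1
    -- Pass 3: global duplicate check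
    if (PySem.Set.ofList positions).length ≠ positions.length then none
    else some positions

-- ===== PRECONDITION & SPEC =====
-- Pre_ excludes exactly the inputs on which A raises ValueError (wrong number of moves).
def Pre_fold_protein (sequence : String) (moves : List Int) : Prop :=
  (moves.length : Int) = PySem.Str.len sequence - 1
instance (sequence : String) (moves : List Int) : Decidable (Pre_fold_protein sequence moves) := by unfold Pre_fold_protein; infer_instance

def pvWitness_fold_protein : String × List Int := ("HPH", [0, 1])

def Spec_fold_protein (sequence : String) (moves : List Int) (out : Option (List (Int × Int))) : Prop := out = fold_protein_alt sequence moves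
instance (sequence : String) (moves : List Int) (out : Option (List (Int × Int))) : Decidable (Spec_fold_protein sequence moves out) := by unfold Spec_fold_protein; infer_instance

-- ===== CLAIM (what is proved, stated in full; the proofs are below) =====
def Claim_equal_fold_protein : Prop := ∀ (sequence : String) (moves : List Int), Dom_fold_protein sequence moves → Pre_fold_protein sequence moves → Spec_fold_protein sequence moves (fold_protein sequence moves)

-- ===== LEMMAS AND PROOFS =====

-- A's turn update
def pvStep (d m : Int) : Int :=
  if m = 1 then PySem.Int.mod (d - 1) 4
  else if m = 2 then PySem.Int.mod (d + 1) 4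
  else d

def pvDir (d : Int) : Int × Int := PySem.List.pyGetD pvDIRECTIONS d (0, 0)

-- the walk from position p facing d: the list of positions visited after p
def pvWalk (p : Int × Int) (d : Int) : List Int → List (Int × Int)
  | [] => []
  | m :: rest =>
    let d' := pvStep d m
    let q := (p.1 + (pvDir d').1, p.2 + (pvDir d').2)
    q :: pvWalk q d' rest

-- B's pass 1 as a recursion
def pvWalkDirs (d : Int) : List Int → List Int
  | [] => []
  | m :: rest =>
    let d' := PySem.Int.mod (d + (if m = 1 then (-1 : Int) else if m = 2 then 1 else 0)) 4
    d' :: pvWalkDirs d' rest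

-- B's pass 2 as a recursion
def pvWalkPos (p : Int × Int) : List Int → List (Int × Int)
  | [] => []
  | d :: rest =>
    let q := (p.1 + (pvDir d).1, p.2 + (pvDir d).2)
    q :: pvWalkPos q rest

theorem pvStepB_eq (d m : Int) (h0 : 0 ≤ d) (h4 : d < 4) :
    PySem.Int.mod (d + (if m = 1 then (-1 : Int) else if m = 2 then 1 else 0)) 4 = pvStep d m := by
  unfold pvStep
  split_ifs with h1 h2
  · ring_nf
  · ring_nf
  · rw [add_zero, PySem.Int.mod_eq_emod_of_pos (by norm_num : (0:Int) < 4), Int.emod_eq_of_lt h0 h4]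

-- Python's positions[-1] after an append
theorem pvLast_append (xs : List (Int × Int)) (x : Int × Int) :
    PySem.List.pyGetD (xs ++ [x]) (-1) (0, 0) = x := by
  simp [PySem.List.pyGetD, PySem.List.pyGet?, PySem.List.pyIdx?]

theorem pvOfList_sublist {α : Type} [BEq α] [LawfulBEq α] (xs : List α) :
    (PySem.Set.ofList xs).Sublist xs := by
  induction xs with
  | nil => simp [PySem.Set.ofList_nil]
  | cons x xs ih =>
    rw [PySem.Set.ofList_cons]
    refine List.Sublist.cons₂ x (List.Sublist.trans ?_ ih)
    simp [PySem.Set.discard]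

-- len(set(xs)) == len(xs) is exactly Nodup
theorem pvOfList_length_iff {α : Type} [BEq α] [LawfulBEq α] (xs : List α) :
    (PySem.Set.ofList xs).length = xs.length ↔ xs.Nodup := by
  constructor
  · intro h
    have := (pvOfList_sublist xs).eq_of_length h
    rw [← this]; exact PySem.Set.nodup_ofList xs
  · intro h; rw [PySem.Set.ofList_eq_self_of_nodup xs h]

-- A's loop: append the walk; none iff any duplicate (a collision anywhere forces none)
theorem pvLoopA_eq (ms : List Int) : ∀ (ps : List (Int × Int)) (d : Int), ps ≠ [] → ps.Nodup →
    foldALoop ms ps (PySem.Set.ofList ps) d =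
      (if (ps ++ pvWalk (PySem.List.pyGetD ps (-1) (0, 0)) d ms).Nodup
       then some (ps ++ pvWalk (PySem.List.pyGetD ps (-1) (0, 0)) d ms) else none) := by
  induction ms with
  | nil => intro ps d _ hnd; simp [foldALoop, pvWalk, hnd]
  | cons m rest ih =>
    intro ps d hne hnd
    have hstep : (if m = 1 then PySem.Int.mod (d - 1) 4 else if m = 2 then PySem.Int.mod (d + 1) 4 else d) = pvStep d m := rfl
    simp only [foldALoop, pvWalk, hstep]
    set last := PySem.List.pyGetD ps (-1) (0, 0) with hlast
    set q : Int × Int := (last.1 + (pvDir (pvStep d m)).1, last.2 + (pvDir (pvStep d m)).2) with hq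
    have hgd : PySem.List.pyGetD pvDIRECTIONS (pvStep d m) (0, 0) = pvDir (pvStep d m) := rfl
    rw [hgd]
    by_cases hmem : q ∈ ps
    · have hc : PySem.Set.contains (PySem.Set.ofList ps) q = true :=
        (PySem.Set.contains_iff _ _).mpr ((PySem.Set.mem_ofList ps q).mpr hmem)
      rw [hc, if_pos rfl]
      have hnodup : ¬ (ps ++ q :: pvWalk q (pvStep d m) rest).Nodup := by
        intro h
        rcases List.nodup_append.mp h with ⟨-, -, hdisj⟩
        exact hdisj q hmem q (List.mem_cons_self ..) rfl
      rw [if_neg hnodup]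
    · have hc : PySem.Set.contains (PySem.Set.ofList ps) q = false := by
        rw [Bool.eq_false_iff]
        intro h
        exact hmem ((PySem.Set.mem_ofList ps q).mp ((PySem.Set.contains_iff _ _).mp h))
      rw [hc, if_neg (by simp)]
      have hnd' : (ps ++ [q]).Nodup := by
        rw [List.nodup_append]
        refine ⟨hnd, List.nodup_singleton q, ?_⟩
        intro a ha b hb
        simp only [List.mem_singleton] at hb
        subst hb
        intro hab; subst hab; exact hmem ha
      rw [← PySem.Set.ofList_append_singleton ps q]
      rw [ih (ps ++ [q]) (pvStep d m) (by simp) hnd']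
      rw [pvLast_append, List.append_assoc, List.singleton_append]

theorem pvMod4_range (a : Int) : 0 ≤ PySem.Int.mod a 4 ∧ PySem.Int.mod a 4 < 4 :=
  ⟨PySem.Int.mod_nonneg a (by norm_num), PySem.Int.mod_lt a (by norm_num)⟩

theorem pvStep_range (d m : Int) (h0 : 0 ≤ d) (h4 : d < 4) :
    0 ≤ pvStep d m ∧ pvStep d m < 4 := by
  unfold pvStep; split_ifs <;> first | exact ⟨h0, h4⟩ | exact pvMod4_range _

-- B's two passes compose to A's single walk (directions stay in [0,4))
theorem pvWalkPos_walkDirs (ms : List Int) : ∀ (p : Int × Int) (d : Int), 0 ≤ d → d < 4 →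
    pvWalkPos p (pvWalkDirs d ms) = pvWalk p d ms := by
  induction ms with
  | nil => intro p d _ _; rfl
  | cons m rest ih =>
    intro p d h0 h4
    simp only [pvWalkDirs, pvWalkPos, pvWalk, pvStepB_eq d m h0 h4]
    have hr := pvStep_range d m h0 h4
    rw [ih _ _ hr.1 hr.2]

-- B's first foldl produces pvWalkDirs
theorem pvDirs_foldl (ms : List Int) : ∀ (acc : List Int) (d : Int),
    (ms.foldl (fun (acc : List Int × Int) m =>
      let d := PySem.Int.mod (acc.2 + (if m = 1 then (-1 : Int) else if m = 2 then 1 else 0)) 4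
      (acc.1 ++ [d], d)) (acc, d)).1 = acc ++ pvWalkDirs d ms := by
  induction ms with
  | nil => intro acc d; simp [pvWalkDirs]
  | cons m rest ih =>
    intro acc d
    simp only [List.foldl_cons, pvWalkDirs, ih, List.append_assoc, List.singleton_append]

-- B's second foldl produces pvWalkPos
theorem pvPos_foldl (ds : List Int) : ∀ (acc : List (Int × Int)) (x y : Int),
    (ds.foldl (fun (acc : List (Int × Int) × Int × Int) d =>
      let dxy := PySem.List.pyGetD pvDIRECTIONS d (0, 0)
      let x := acc.2.1 + dxy.1
      let y := acc.2.2 + dxy.2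
      (acc.1 ++ [(x, y)], x, y)) (acc, x, y)).1 = acc ++ pvWalkPos (x, y) ds := by
  induction ds with
  | nil => intro acc x y; simp [pvWalkPos]
  | cons d rest ih =>
    intro acc x y
    simp only [List.foldl_cons, pvWalkPos, ih, pvDir, List.append_assoc, List.singleton_append]

-- ===== VERDICT (by name: the statement is the Claim_ definition above) =====
theorem fold_protein_spec : Claim_equal_fold_protein := by
  intro sequence moves _ hpre
  unfold Spec_fold_protein fold_protein fold_protein_alt
  unfold Pre_fold_protein at hpre
  rw [if_neg (by omega), if_neg (by omega)]
  have hA := pvLoopA_eq moves [(0, 0)] 0 (by simp) (by simp)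
  have hlast : PySem.List.pyGetD [((0 : Int), (0 : Int))] (-1) ((0 : Int), (0 : Int)) = ((0 : Int), (0 : Int)) := by decide
  rw [hlast] at hA
  rw [hA, pvDirs_foldl moves [] 0]
  simp only [List.nil_append]
  rw [pvPos_foldl (pvWalkDirs 0 moves) [((0 : Int), (0 : Int))] 0 0,
    pvWalkPos_walkDirs moves (0, 0) 0 (by norm_num) (by norm_num)]
  set L := [((0 : Int), (0 : Int))] ++ pvWalk (0, 0) 0 moves with hL
  by_cases hnd : L.Nodup
  · rw [if_pos hnd, if_neg (by rw [Ne, pvOfList_length_iff]; exact not_not_intro hnd)]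
  · rw [if_neg hnd, if_pos (by rw [Ne, pvOfList_length_iff]; exact hnd)]
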